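-- pv_equiv track=rewrite | github.com/MinDongRyul/baekjoon_code | 백준/Silver/1652. 누울 자리를 찾아라/누울 자리를 찾아라.py | func
-- ===== SOURCE A (Python) =====
-- def func(arr : int) -> int:
--     total = 0
--     for arr_ in arr:
--         temp = 0
--         for idx in range(len(arr_) - 1):
--             current, future = arr_[idx], arr_[idx+1]
--             if current == future and current != 'X':
--                 temp += 1
--             elif temp > 0 and current != future:
--                 temp = 0
--                 total += 1
--         if temp > 0:
--             total += 1
--     return total
-- ===== SOURCE B (Python) =====
-- def func(arr):
--     total = 0
--     for row in arr:
--         rest = row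
--         while rest:
--             c = rest[0]
--             k = 1
--             while k < len(rest) and rest[k] == c:
--                 k += 1
--             if c != 'X' and k >= 2:
--                 total += 1
--             rest = rest[k:]
--     return total
-- ===== Notes on version B (the rewrite author's own statement) =====
-- stated objective: simpler
-- what changed: Replaced A's adjacent-equal-pair accumulator (temp counter with reset/flush bookkeeping) by a direct scan over maximal runs: find each run's length, count it if its character is not 'X' and the length is >= 2, then jump past it.
import Mathlib
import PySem

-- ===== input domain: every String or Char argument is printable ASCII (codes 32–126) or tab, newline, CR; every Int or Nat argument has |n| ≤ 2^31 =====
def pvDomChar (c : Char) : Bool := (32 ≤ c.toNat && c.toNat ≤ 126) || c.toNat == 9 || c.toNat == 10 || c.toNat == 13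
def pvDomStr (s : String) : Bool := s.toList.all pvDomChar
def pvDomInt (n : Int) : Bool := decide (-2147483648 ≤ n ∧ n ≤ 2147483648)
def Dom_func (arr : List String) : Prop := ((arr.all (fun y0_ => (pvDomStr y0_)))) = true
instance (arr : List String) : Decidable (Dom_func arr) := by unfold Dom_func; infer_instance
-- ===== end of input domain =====

-- B replaces A's adjacent-equal-pair accumulator with an explicit scan over maximal runs
-- (jump to the end of each run, count it if its character ≠ 'X' and its length ≥ 2); same cost, plainer decomposition.

-- ===== PORT A =====
def func (arr : List String) : Int :=
  arr.foldl (fun total s =>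
    let cs := s.toList
    let st := (PySem.List.pyRange 0 ((cs.length : Int) - 1) 1).foldl
      (fun (st : Int × Int) idx =>
        let current := PySem.List.pyGetD cs idx ' '
        let future := PySem.List.pyGetD cs (idx + 1) ' '
        if current = future ∧ current ≠ 'X' then (st.1 + 1, st.2)
        else if 0 < st.1 ∧ current ≠ future then ((0 : Int), st.2 + 1)
        else st) ((0 : Int), total)
    if 0 < st.1 then st.2 + 1 else st.2) 0

-- ===== PORT B =====
-- Source B's inner while loop: `rest` is the unprocessed suffix; k = length of the maximal
-- run at its head (1 + matching chars after the first); count the run, drop it.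
def rowRuns : List Char → Int → Int
  | [], total => total
  | c :: rest, total =>
    let k : Int := 1 + (rest.takeWhile (· == c)).length
    let total' := if c ≠ 'X' ∧ 2 ≤ k then total + 1 else total
    rowRuns (rest.dropWhile (· == c)) total'
termination_by l _ => l.length
decreasing_by
  have := List.length_dropWhile_le (· == c) rest
  simp; omega

def func_alt (arr : List String) : Int :=
  arr.foldl (fun total row => rowRuns row.toList total) 0

-- ===== PRECONDITION & SPEC =====
def Spec_func (arr : List String) (out : Int) : Prop := out = func_alt arr
instance (arr : List String) (out : Int) : Decidable (Spec_func arr out) := by unfold Spec_func; infer_instance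

-- ===== CLAIM (what is proved, stated in full; the proofs are below) =====
def Claim_equal_func : Prop := ∀ (arr : List String), Dom_func arr → Spec_func arr (func arr)

-- ===== LEMMAS AND PROOFS =====

-- A's loop body, as a step function on (temp, total) and the pair (current, future).
def pairStep (st : Int × Int) (p : Char × Char) : Int × Int :=
  if p.1 = p.2 ∧ p.1 ≠ 'X' then (st.1 + 1, st.2)
  else if 0 < st.1 ∧ p.1 ≠ p.2 then ((0 : Int), st.2 + 1)
  else st

-- A's inner loop with the trailing `if temp > 0` check, rephrased structurally.
def pairScan : Char → List Char → Int → Int → Int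
  | _, [], temp, total => if 0 < temp then total + 1 else total
  | prev, c :: cs, temp, total =>
    let st := pairStep (temp, total) (prev, c)
    pairScan c cs st.1 st.2

def finalize (st : Int × Int) : Int := if 0 < st.1 then st.2 + 1 else st.2

lemma finalize_fold_eq_pairScan : ∀ (rest : List Char) (prev : Char) (temp total : Int),
    finalize (((prev :: rest).zip rest).foldl pairStep (temp, total)) = pairScan prev rest temp total := by
  intro rest
  induction rest with
  | nil => intro prev temp total; simp [pairScan, finalize]
  | cons c cs ih =>
    intro prev temp total
    rw [List.zip_cons_cons]
    simp only [List.foldl_cons, pairScan]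
    rcases h : pairStep (temp, total) (prev, c) with ⟨t1, t2⟩
    simpa using ih c t1 t2

-- The range fold of A equals the fold of pairStep over adjacent pairs.
lemma range_fold_eq_zip_fold (cs : List Char) (init : Int × Int) :
    (PySem.List.pyRange 0 ((cs.length : Int) - 1) 1).foldl
      (fun (st : Int × Int) idx =>
        let current := PySem.List.pyGetD cs idx ' '
        let future := PySem.List.pyGetD cs (idx + 1) ' '
        if current = future ∧ current ≠ 'X' then (st.1 + 1, st.2)
        else if 0 < st.1 ∧ current ≠ future then ((0 : Int), st.2 + 1)
        else st) init
    = ((cs.zip cs.tail).foldl pairStep init) := by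
  cases cs with
  | nil =>
    rw [PySem.List.pyRange_one_eq_nil (by norm_num)]
    simp
  | cons c rest =>
    simp only [List.tail_cons]
    have hlen : (((c :: rest).length : Int) - 1) = ((((c :: rest).zip rest).length : Int)) := by
      simp
    rw [hlen]
    refine Eq.trans
      (PySem.List.foldl_congr_mem _ _
        (fun acc j => pairStep acc (PySem.List.pyGetD ((c :: rest).zip rest) j (' ', ' ')))
        init ?_)
      (PySem.List.foldl_pyRange_zero_pyGetD' ((c :: rest).zip rest) (' ', ' ') pairStep init)
    intro acc x hx
    rw [PySem.List.mem_pyRange_one] at hx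
    obtain ⟨hx0, hxlt⟩ := hx
    have hzl : ((c :: rest).zip rest).length = rest.length := by simp
    have hxn : x.toNat < ((c :: rest).zip rest).length := by omega
    have hxc : x.toNat < (c :: rest).length := by simp; omega
    have hxc1 : x.toNat + 1 < (c :: rest).length := by simp; omega
    have hx1 : (x + 1).toNat = x.toNat + 1 := by omega
    have hxr : x < (rest.length : Int) := by simpa using hxlt
    rw [PySem.List.pyGetD_eq_getElem _ _ hx0 (by omega),
        PySem.List.pyGetD_eq_getElem _ _ (by omega : (0:Int) ≤ x + 1) (by omega)]
    simp only [pairStep, PySem.List.pyGetD_eq_getElem _ _ hx0 hxlt, hx1, List.getElem_zip]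
    have htail : rest[x.toNat]'(by omega) = (c :: rest)[x.toNat + 1]'hxc1 := by
      simp
    rw [htail]

-- Main invariant: pairScan counts exactly the maximal runs rowRuns counts.
lemma pairScan_eq_rowRuns : ∀ (rest : List Char) (prev : Char) (total : Int),
    (pairScan prev rest 0 total = rowRuns (prev :: rest) total) ∧
    (∀ temp : Int, 0 < temp → prev ≠ 'X' →
      pairScan prev rest temp total = rowRuns (rest.dropWhile (· == prev)) (total + 1)) := by
  intro rest
  induction rest with
  | nil =>
    intro prev total
    constructor
    · simp [pairScan, rowRuns]
    · intro temp ht _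
      simp [pairScan, rowRuns, if_pos ht]
  | cons c cs ih =>
    intro prev total
    constructor
    · -- temp = 0 case
      by_cases hec : prev = c
      · subst hec
        by_cases hX : prev = 'X'
        · subst hX
          have h1 : pairScan 'X' ('X' :: cs) 0 total = pairScan 'X' cs 0 total := by
            simp [pairScan, pairStep]
          rw [h1, (ih 'X' total).1]
          rw [rowRuns, rowRuns]
          simp
        · have h1 : pairScan prev (prev :: cs) 0 total = pairScan prev cs 1 total := by
            simp [pairScan, pairStep, hX]
          rw [h1, (ih prev total).2 1 one_pos hX]
          rw [show rowRuns (prev :: prev :: cs) total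
              = rowRuns ((prev :: cs).dropWhile (· == prev)) (total + 1) by
            rw [rowRuns]
            have hcond : prev ≠ 'X' ∧
                (2 : Int) ≤ 1 + (((prev :: cs).takeWhile (· == prev)).length : Int) := by
              refine ⟨hX, ?_⟩
              simp
              omega
            simp only [if_pos hcond]]
          simp
      · have hbc : (c == prev) = false := by
          simp only [beq_eq_false_iff_ne]; exact fun h => hec h.symm
        have h1 : pairScan prev (c :: cs) 0 total = pairScan c cs 0 total := by
          simp [pairScan, pairStep, hec]
        rw [h1, (ih c total).1]
        rw [show rowRuns (prev :: c :: cs) total = rowRuns (c :: cs) total by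
          rw [rowRuns]
          simp [hbc]]
    · -- temp > 0 case (prev ≠ 'X')
      intro temp ht hX
      by_cases hec : prev = c
      · subst hec
        have h1 : pairScan prev (prev :: cs) temp total = pairScan prev cs (temp + 1) total := by
          simp [pairScan, pairStep, hX]
        rw [h1, (ih prev total).2 (temp + 1) (by omega) hX]
        simp
      · have hbc : (c == prev) = false := by
          simp only [beq_eq_false_iff_ne]; exact fun h => hec h.symm
        have h1 : pairScan prev (c :: cs) temp total = pairScan c cs 0 (total + 1) := by
          simp [pairScan, pairStep, hec, ht]
        rw [h1, (ih c (total + 1)).1]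
        simp [hbc]

lemma row_eq (s : String) (total : Int) :
    (let cs := s.toList
     let st := (PySem.List.pyRange 0 ((cs.length : Int) - 1) 1).foldl
       (fun (st : Int × Int) idx =>
         let current := PySem.List.pyGetD cs idx ' '
         let future := PySem.List.pyGetD cs (idx + 1) ' '
         if current = future ∧ current ≠ 'X' then (st.1 + 1, st.2)
         else if 0 < st.1 ∧ current ≠ future then ((0 : Int), st.2 + 1)
         else st) ((0 : Int), total)
     if 0 < st.1 then st.2 + 1 else st.2) = rowRuns s.toList total := by
  simp only [range_fold_eq_zip_fold]
  cases h : s.toList with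
  | nil => simp [rowRuns]
  | cons c rest =>
    have := finalize_fold_eq_pairScan rest c 0 total
    simp only [finalize] at this
    simp only [List.tail_cons]
    rw [this, (pairScan_eq_rowRuns rest c total).1]

-- ===== VERDICT (by name: the statement is the Claim_ definition above) =====
theorem func_spec : Claim_equal_func := by
  intro arr _
  unfold Spec_func func func_alt
  congr 1
  funext total s
  exact row_eq s total
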